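-- pv_equiv track=rewrite | github.com/HSJung93/-Python-CodingPractices | bfs_following_hard_lineCatchMe.py | solution
-- ===== SOURCE A (Python) =====
-- from collections import deque
--
-- def solution(conyPosition, brownPosition):
--     time = 0
--     MAX = 2 * 10**5
--     visit = [set() for _ in range(MAX+1)] # 브라운이 visit에 도달한 시간을 업데이트 해간다
--     visit[brownPosition].add(0)
--     q = deque()
--     q.append((brownPosition, 0))
--
--     cnt = 0
--
--     while conyPosition <= MAX:
--         conyPosition += time
--
--         if conyPosition > MAX:
--             return - 1
--
--         if time in visit[conyPosition]: # 코니의 현 포지션에 브라운이 도착한 시간이 있다면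
--             return time
--
--         for i in range(0, len(q)):
--             curPosition, curTime = q.popleft()
--             # 값을 넣어두지 않으면 외부에 저장한 값에서 불러와야 하는데 외부에 저장한 값이 여러 개이기 때문에 불러오기가 쉽지 않다. 그래서 값을 저장해둔다.
--             newTime = curTime + 1
--
--             for newPosition in (curPosition-1, curPosition+1, curPosition*2):
--                 if 0 <= newPosition <= MAX:
--                     visit[newPosition].add(newTime)
--                     q.append((newPosition, newTime))
--
--         time += 1
-- ===== SOURCE B (Python) =====
-- def solution(conyPosition, brownPosition):
--     MAX = 2 * 10**5
--     # Phase 1: BFS over (position, time-parity) states, visiting each state once,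
--     # to precompute the earliest time Brown can stand on each position with each parity.
--     dist = {(brownPosition, 0): 0}
--     frontier = [(brownPosition, 0)]
--     d = 0
--     while frontier:
--         d += 1
--         nxt = []
--         for p, par in frontier:
--             for n in (p - 1, p + 1, 2 * p):
--                 if 0 <= n <= MAX and (n, 1 - par) not in dist:
--                     dist[(n, 1 - par)] = d
--                     nxt.append((n, 1 - par))
--         frontier = nxt
--     # Phase 2: scan Cony's deterministic trajectory; Brown can be at position x at
--     # time t iff he can first reach x with parity t%2 at some time <= t (he can
--     # always wait two steps by bouncing to a neighbour and back).
--     t = 0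
--     while conyPosition <= MAX:
--         conyPosition += t
--         if conyPosition > MAX:
--             return -1
--         if (conyPosition, t % 2) in dist and dist[(conyPosition, t % 2)] <= t:
--             return t
--         t += 1
-- ===== Notes on version B (the rewrite author's own statement) =====
-- stated objective: alternative
-- what changed: A interleaves pursuit and search, flooding a never-deduplicated deque that triples every time step (~3^t tuples) plus a 200001-entry array of time-stamp sets; B instead runs one standard BFS over the 400002 (position, time-parity) states, visiting each state at most once to precompute Brown's earliest reach-time per state, and then separately scans Cony's deterministic trajectory comparing t against the precomputed reach-time (Brown can wait by bouncing to a neighbour and back, which preserves parity); …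
-- outside the precondition, e.g. on solution(200001, 0): A returns None, B returns None; on solution(0, 300000): A raises IndexError, B returns -1; on solution(200000, -1): A returns 0, B returns -1
import Mathlib
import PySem

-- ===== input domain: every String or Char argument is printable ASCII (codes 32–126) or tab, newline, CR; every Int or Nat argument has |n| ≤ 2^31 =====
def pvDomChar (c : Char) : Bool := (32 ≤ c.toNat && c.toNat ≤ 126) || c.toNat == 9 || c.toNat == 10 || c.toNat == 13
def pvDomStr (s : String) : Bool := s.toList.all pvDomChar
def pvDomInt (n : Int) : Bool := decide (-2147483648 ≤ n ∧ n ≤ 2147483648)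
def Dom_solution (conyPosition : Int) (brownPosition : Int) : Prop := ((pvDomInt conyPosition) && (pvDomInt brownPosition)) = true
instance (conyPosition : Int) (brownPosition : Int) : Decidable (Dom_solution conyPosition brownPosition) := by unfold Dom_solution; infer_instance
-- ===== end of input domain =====

-- B replaces A's never-deduplicated moving-target queue by one BFS over (position, time-parity)
-- states (each visited once) that precomputes Brown's earliest reach-times, followed by a scan of
-- Cony's trajectory (objective: alternative).


-- ===== PORT A =====
def pvMAX : Int := 2 * 10 ^ 5

-- A's `visit` is a Python list of MAX+1 time-stamp sets indexed by position; it is carried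
-- here as a position-keyed hash map whose absent entries are the still-empty sets
-- (exact on 0 ≤ index ≤ MAX, the only indices A touches inside Pre_solution);
-- each per-position time-stamp set is a PySem.Set Int.
-- body of the inner `for newPosition in …` loop: conditional visit-update and queue-append;
-- appended queue entries are collected front-first in s.2 (reversed once per level below)
def pvPush (s : Std.HashMap Int (List Int) × List (Int × Int)) (nt np : Int) :
    Std.HashMap Int (List Int) × List (Int × Int) :=
  if 0 ≤ np ∧ np ≤ pvMAX then
    (s.1.insert np (PySem.Set.add (s.1.getD np []) nt), (np, nt) :: s.2)
  else s

-- `for i in range(0, len(q)): curPosition, curTime = q.popleft(); …` — pop n elements off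
-- the deque's front, appending each one's in-range moves to the back; like Python's deque
-- the appends cost O(1): they are accumulated in reverse in `racc` and re-ordered once,
-- so the returned queue is exactly the remaining front followed by the appends in order
def pvLevel : Nat → Std.HashMap Int (List Int) → List (Int × Int) → List (Int × Int) →
    Std.HashMap Int (List Int) × List (Int × Int)
  | 0, v, q, racc => (v, q ++ racc.reverse)
  | n + 1, v, q, racc =>
    match q with
    | [] => (v, racc.reverse)    -- unreachable: pvLevel is always called with n = q.length
    | (p, ct) :: rest =>
      let s := [p - 1, p + 1, p * 2].foldl (fun s np => pvPush s (ct + 1) np) (v, racc)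
      pvLevel n s.1 rest s.2

-- the `while conyPosition <= MAX` loop (fuel-counted; ≤ ~633 iterations ever happen,
-- since conyPosition gains `time` each round, so fuel 2000 is never exhausted)
def pvRunA : Nat → Int → Int → Std.HashMap Int (List Int) → List (Int × Int) → Int
  | 0, _, _, _, _ => 0
  | fuel + 1, c, t, v, q =>
    if c ≤ pvMAX then
      if c + t > pvMAX then -1
      else if t ∈ v.getD (c + t) [] then t
      else
        let s := pvLevel q.length v q []
        pvRunA fuel (c + t) (t + 1) s.1 s.2
    else 0    -- Python falls off the while and returns None here; excluded by Pre_solution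

def solution (conyPosition : Int) (brownPosition : Int) : Int :=
  -- visit = [set(), …]; visit[brownPosition].add(0); q = deque([(brownPosition, 0)])
  pvRunA 2000 conyPosition 0
    ((∅ : Std.HashMap Int (List Int)).insert brownPosition
      (PySem.Set.add ((∅ : Std.HashMap Int (List Int)).getD brownPosition []) 0))
    [(brownPosition, 0)]

-- ===== PORT B =====
-- B's `dist` dict is keyed by (position, parity) and only ever read by key, so it is carried
-- as a hash map (exact: same lookups; Python's dict insertion order is never observed).
-- the tuple `(p - 1, p + 1, 2 * p)` of candidate moves
def pvMoves3 (p : Int) : List Int := [p - 1, p + 1, 2 * p]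

-- body of B's inner `for n in (p-1, p+1, 2*p)` loop: insert the state if in range and unseen;
-- like Python's O(1) list.append, appended states are collected front-first (reversed once
-- per level below), so the next frontier is exactly the appends in order
def pvIns (dth : Int) (st : Std.HashMap (Int × Int) Int × List (Int × Int)) (s : Int × Int) :
    Std.HashMap (Int × Int) Int × List (Int × Int) :=
  if 0 ≤ s.1 ∧ s.1 ≤ pvMAX ∧ ¬ st.1.contains s then
    (st.1.insert s dth, s :: st.2)
  else st

-- one frontier element (p, par): try the three successor states (n, 1 - par)
def pvExpand (dth : Int) (st : Std.HashMap (Int × Int) Int × List (Int × Int))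
    (pp : Int × Int) : Std.HashMap (Int × Int) Int × List (Int × Int) :=
  ((pvMoves3 pp.1).map (fun n => (n, 1 - pp.2))).foldl (pvIns dth) st

-- B's `while frontier:` BFS loop (fuel-counted; each round either stops on an empty frontier
-- or inserts at least one of the finitely many states, so fuel 400010 is never exhausted)
def pvBFS : Nat → Std.HashMap (Int × Int) Int → List (Int × Int) → Int →
    Std.HashMap (Int × Int) Int
  | 0, dist, _, _ => dist
  | fuel + 1, dist, frontier, d =>
    if frontier = [] then dist
    else
      let st := frontier.foldl (pvExpand (d + 1)) (dist, [])
      pvBFS fuel st.1 st.2.reverse (d + 1)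

-- B's scan loop over t (fuel-counted like A's loop; same ≤ ~633 iterations)
def pvScan : Nat → Int → Int → Std.HashMap (Int × Int) Int → Int
  | 0, _, _, _ => 0
  | fuel + 1, c, t, dist =>
    if c ≤ pvMAX then
      if c + t > pvMAX then -1
      else if (match dist[(c + t, PySem.Int.mod t 2)]? with
               | some v => decide (v ≤ t)
               | none => false) then t
      else pvScan fuel (c + t) (t + 1) dist
    else 0    -- Python B likewise falls off the while (None); excluded by Pre_solution

def solution_alt (conyPosition : Int) (brownPosition : Int) : Int :=
  pvScan 2000 conyPosition 0
    (pvBFS 400010 ((∅ : Std.HashMap (Int × Int) Int).insert (brownPosition, 0) 0)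
      [(brownPosition, 0)] 0)

-- ===== PRECONDITION & SPEC =====
-- Pre_ restricts to the problem's natural board 0..MAX: for conyPosition > MAX both Pythons
-- fall off the while returning None (not an int), and for negative arguments A's behaviour is
-- a negative-list-index artefact (wraparound or IndexError) outside the intended domain.
def Pre_solution (conyPosition : Int) (brownPosition : Int) : Prop :=
  0 ≤ conyPosition ∧ conyPosition ≤ 200000 ∧ 0 ≤ brownPosition ∧ brownPosition ≤ 200000
instance (conyPosition : Int) (brownPosition : Int) : Decidable (Pre_solution conyPosition brownPosition) := by unfold Pre_solution; infer_instance
def pvWitness_solution : Int × Int := (3, 5)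
def Spec_solution (conyPosition : Int) (brownPosition : Int) (out : Int) : Prop := out = solution_alt conyPosition brownPosition
instance (conyPosition : Int) (brownPosition : Int) (out : Int) : Decidable (Spec_solution conyPosition brownPosition out) := by unfold Spec_solution; infer_instance

-- ===== CLAIM (what is proved, stated in full; the proofs are below) =====
def Claim_equal_solution : Prop := ∀ (conyPosition : Int) (brownPosition : Int), Dom_solution conyPosition brownPosition → Pre_solution conyPosition brownPosition → Spec_solution conyPosition brownPosition (solution conyPosition brownPosition)

-- ===== LEMMAS AND PROOFS =====

-- the in-range moves of one position: (p - 1, p + 1, p * 2) filtered by 0 <= n <= MAX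
def pvNbrs (p : Int) : List Int :=
  [p - 1, p + 1, p * 2].filter (fun n => decide (0 ≤ n ∧ n ≤ pvMAX))

-- Brown's exact-time frontier: positions reachable in exactly k steps (with multiplicity)
def pvFront (brown : Int) : Nat → List Int
  | 0 => [brown]
  | k + 1 => (pvFront brown k).flatMap pvNbrs

-- A's moving-target loop expressed over the exact-time frontier list
def pvRunF : Nat → Int → Int → List Int → Int
  | 0, _, _, _ => 0
  | fuel + 1, c, t, ps =>
    if c ≤ pvMAX then
      if c + t > pvMAX then -1
      else if (c + t) ∈ ps then t
      else pvRunF fuel (c + t) (t + 1) (ps.flatMap pvNbrs)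
    else 0

theorem pvMAX_eq : pvMAX = 200000 := by norm_num [pvMAX]

-- ---------- A-side: pvRunA equals pvRunF ----------

-- sequentially stamping time t' into the visit map at every position of l
def pvAddAll (v : Std.HashMap Int (List Int)) (t' : Int) (l : List Int) :
    Std.HashMap Int (List Int) :=
  l.foldl (fun v np => v.insert np (PySem.Set.add (v.getD np []) t')) v

theorem pvAddAll_append (v : Std.HashMap Int (List Int)) (t' : Int) (l₁ l₂ : List Int) :
    pvAddAll v t' (l₁ ++ l₂) = pvAddAll (pvAddAll v t' l₁) t' l₂ := by
  simp [pvAddAll, List.foldl_append]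

theorem mem_pvAddAll (v : Std.HashMap Int (List Int)) (t' : Int) (l : List Int) (x s : Int) :
    s ∈ (pvAddAll v t' l).getD x [] ↔ (s = t' ∧ x ∈ l) ∨ s ∈ v.getD x [] := by
  induction l generalizing v with
  | nil => simp [pvAddAll]
  | cons a l ih =>
    simp only [pvAddAll, List.foldl_cons] at *
    rw [ih]
    by_cases hxa : x = a
    · subst hxa
      simp [PySem.Set.mem_add]
      tauto
    · have hax : ¬ a = x := fun h => hxa h.symm
      simp [Std.HashMap.getD_insert, hax]
      tauto

-- the three-way push fold = stamp the filtered neighbours + cons them (reversed) onto racc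
theorem pvPush_foldl (l : List Int) (v : Std.HashMap Int (List Int))
    (racc : List (Int × Int)) (t' : Int) :
    l.foldl (fun s np => pvPush s t' np) (v, racc) =
      (pvAddAll v t' (l.filter (fun n => decide (0 ≤ n ∧ n ≤ pvMAX))),
       ((l.filter (fun n => decide (0 ≤ n ∧ n ≤ pvMAX))).map (fun n => (n, t'))).reverse
         ++ racc) := by
  induction l generalizing v racc with
  | nil => simp [pvAddAll]
  | cons a l ih =>
    simp only [List.foldl_cons, List.filter_cons]
    by_cases h : 0 ≤ a ∧ a ≤ pvMAX
    · rw [show pvPush (v, racc) t' a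
            = (v.insert a (PySem.Set.add (v.getD a []) t'), (a, t') :: racc) from by
          simp [pvPush, h], ih]
      simp [pvAddAll, h]
    · rw [show pvPush (v, racc) t' a = (v, racc) from by simp [pvPush, h], ih]
      simp [h]

-- one whole level: popping the ps-entries (all carrying time t) stamps t+1 at every
-- flat-mapped neighbour and leaves exactly those neighbours, stamped t+1, as the new queue
theorem pvLevel_eq (t : Int) (ps : List Int) (v : Std.HashMap Int (List Int))
    (racc : List (Int × Int)) :
    pvLevel ps.length v (ps.map (fun p => (p, t))) racc =
      (pvAddAll v (t + 1) (ps.flatMap pvNbrs),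
       racc.reverse ++ (ps.flatMap pvNbrs).map (fun n => (n, t + 1))) := by
  induction ps generalizing v racc with
  | nil => simp [pvLevel, pvAddAll]
  | cons p ps ih =>
    simp only [List.length_cons, List.map_cons, pvLevel]
    rw [pvPush_foldl]
    rw [ih]
    simp [pvAddAll_append, List.flatMap_cons, pvNbrs]

-- loop invariant: A's queue is the frontier ps stamped with the current time and A's visit
-- contains the current time exactly at the members of ps
theorem pvRunA_eq_pvRunF (fuel : Nat) (t c : Int) (v : Std.HashMap Int (List Int))
    (q : List (Int × Int)) (ps : List Int)
    (hq : q = ps.map (fun p => (p, t)))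
    (hv : ∀ x, t ∈ v.getD x [] ↔ x ∈ ps)
    (hle : ∀ x s, s ∈ v.getD x [] → s ≤ t) :
    pvRunA fuel c t v q = pvRunF fuel c t ps := by
  induction fuel generalizing t c v q ps with
  | zero => rfl
  | succ fuel ih =>
    simp only [pvRunA, pvRunF]
    by_cases h1 : c ≤ pvMAX
    · simp only [if_pos h1]
      by_cases h2 : c + t > pvMAX
      · simp [h2]
      · simp only [if_neg h2]
        have hguard : (t ∈ v.getD (c + t) []) = ((c + t) ∈ ps) := by
          simp [hv]
        by_cases h3 : t ∈ v.getD (c + t) []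
        · rw [if_pos h3, if_pos (by rwa [← hguard])]
        · rw [if_neg h3, if_neg (by rwa [← hguard])]
          subst hq
          have hlvl := pvLevel_eq t ps v []
          simp only [List.reverse_nil, List.nil_append] at hlvl
          simp only [List.length_map, hlvl]
          apply ih _ _ _ _ (ps.flatMap pvNbrs) rfl
          · intro x
            rw [mem_pvAddAll]
            constructor
            · rintro (⟨-, hx⟩ | hx)
              · exact hx
              · exact absurd (hle x (t + 1) hx) (by omega)
            · intro hx; exact Or.inl ⟨rfl, hx⟩
          · intro x s hs
            rcases (mem_pvAddAll v (t + 1) _ x s).1 hs with ⟨rfl, -⟩ | hs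
            · omega
            · exact le_trans (hle x s hs) (by omega)
    · simp [h1]

-- ---------- frontier facts ----------

theorem pvFront_range (brown : Int) (hb : 0 ≤ brown ∧ brown ≤ pvMAX) :
    ∀ (k : Nat) (x : Int), x ∈ pvFront brown k → 0 ≤ x ∧ x ≤ pvMAX := by
  intro k
  cases k with
  | zero => intro x hx; simp [pvFront] at hx; omega
  | succ k =>
    intro x hx
    simp only [pvFront, List.mem_flatMap, pvNbrs, List.mem_filter] at hx
    obtain ⟨p, -, -, hr⟩ := hx
    simpa using of_decide_eq_true hr

-- bounce: any in-range position reachable in exactly k steps is reachable in exactly k+2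
theorem pvFront_add_two (brown : Int) (hb : 0 ≤ brown ∧ brown ≤ pvMAX)
    (k : Nat) (x : Int) (hx : x ∈ pvFront brown k) : x ∈ pvFront brown (k + 2) := by
  have hr := pvFront_range brown hb k x hx
  have hM := pvMAX_eq
  by_cases h0 : x = 0
  · -- bounce 0 → 1 → 0
    have h1 : (1 : Int) ∈ pvNbrs x := by
      subst h0; simp [pvNbrs, pvMAX_eq]
    have h2 : x ∈ pvNbrs 1 := by
      subst h0
      have : (0 : Int) = 1 - 1 := by norm_num
      simp [pvNbrs, pvMAX_eq]
    show x ∈ (pvFront brown (k+1)).flatMap pvNbrs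
    refine List.mem_flatMap.2 ⟨1, ?_, h2⟩
    exact List.mem_flatMap.2 ⟨x, hx, h1⟩
  · -- bounce x → x-1 → x
    have h1 : (x - 1) ∈ pvNbrs x := by
      simp only [pvNbrs, List.mem_filter]
      constructor
      · simp
      · exact decide_eq_true (by omega)
    have h2 : x ∈ pvNbrs (x - 1) := by
      simp only [pvNbrs, List.mem_filter]
      constructor
      · simp only [List.mem_cons, List.not_mem_nil, or_false]; omega
      · exact decide_eq_true (by omega)
    show x ∈ (pvFront brown (k+1)).flatMap pvNbrs
    refine List.mem_flatMap.2 ⟨x - 1, ?_, h2⟩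
    exact List.mem_flatMap.2 ⟨x, hx, h1⟩

theorem pvFront_mono (brown : Int) (hb : 0 ≤ brown ∧ brown ≤ pvMAX)
    (j m : Nat) (hle : j ≤ m) (hpar : j % 2 = m % 2) (x : Int)
    (hx : x ∈ pvFront brown j) : x ∈ pvFront brown m := by
  obtain ⟨k, rfl⟩ : ∃ k, m = j + 2 * k := ⟨(m - j) / 2, by omega⟩
  clear hle hpar
  induction k with
  | zero => simpa using hx
  | succ k ih =>
    have : j + 2 * (k + 1) = (j + 2 * k) + 2 := by ring
    rw [this]
    exact pvFront_add_two brown hb _ x ih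

-- ---------- B-side: BFS characterisation ----------

-- the fold of pvIns over a candidate list: lookup and newly-appended-frontier description
theorem pvIns_foldl (dth : Int) (cs : List (Int × Int)) (dist : Std.HashMap (Int × Int) Int)
    (acc : List (Int × Int)) :
    (∀ s v, (cs.foldl (pvIns dth) (dist, acc)).1[s]? = some v ↔
      (dist[s]? = some v ∨
        (dist[s]? = none ∧ s ∈ cs ∧ (0 ≤ s.1 ∧ s.1 ≤ pvMAX) ∧ v = dth))) ∧
    (∀ s, s ∈ (cs.foldl (pvIns dth) (dist, acc)).2 ↔
      (s ∈ acc ∨ (dist[s]? = none ∧ s ∈ cs ∧ (0 ≤ s.1 ∧ s.1 ≤ pvMAX)))) := by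
  induction cs generalizing dist acc with
  | nil =>
    constructor
    · intro s v
      constructor
      · intro h; exact Or.inl h
      · rintro (h | ⟨-, h, -⟩)
        · exact h
        · exact absurd h (List.not_mem_nil)
    · intro s
      constructor
      · intro h; exact Or.inl h
      · rintro (h | ⟨-, h, -⟩)
        · exact h
        · exact absurd h (List.not_mem_nil)
  | cons c cs ih =>
    simp only [List.foldl_cons]
    by_cases h : 0 ≤ c.1 ∧ c.1 ≤ pvMAX ∧ ¬ dist.contains c
    · have hstep : pvIns dth (dist, acc) c = (dist.insert c dth, c :: acc) := by
        unfold pvIns; rw [if_pos h]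
      rw [hstep]
      have hcnone : dist[c]? = none := by
        have := h.2.2
        rw [Std.HashMap.contains_eq_isSome_getElem?] at this
        simpa using this
      have hins : ∀ s : Int × Int, (dist.insert c dth)[s]? =
          if c = s then some dth else dist[s]? := by
        intro s
        rw [Std.HashMap.getElem?_insert]
        by_cases hcs : c = s
        · simp [hcs]
        · simp [hcs]
      obtain ⟨ih1, ih2⟩ := ih (dist.insert c dth) (c :: acc)
      constructor
      · intro s v
        rw [ih1, hins]
        by_cases hsc : c = s
        · subst hsc
          rw [if_pos rfl, hcnone]
          constructor
          · rintro (hv | ⟨hv, -⟩)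
            · exact Or.inr ⟨rfl, List.mem_cons_self .., ⟨h.1, h.2.1⟩,
                (Option.some.inj hv).symm⟩
            · exact absurd hv (by simp)
          · rintro (hv | ⟨-, -, -, rfl⟩)
            · exact absurd hv (by simp)
            · exact Or.inl rfl
        · rw [if_neg hsc]
          constructor
          · rintro (hv | ⟨hn, hm, hr, rfl⟩)
            · exact Or.inl hv
            · exact Or.inr ⟨hn, List.mem_cons_of_mem _ hm, hr, rfl⟩
          · rintro (hv | ⟨hn, hm, hr, rfl⟩)
            · exact Or.inl hv
            · rcases List.mem_cons.1 hm with rfl | hm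
              · exact absurd rfl hsc
              · exact Or.inr ⟨hn, hm, hr, rfl⟩
      · intro s
        rw [ih2, hins]
        by_cases hsc : c = s
        · subst hsc
          constructor
          · intro _
            exact Or.inr ⟨hcnone, List.mem_cons_self .., h.1, h.2.1⟩
          · intro _
            exact Or.inl (List.mem_cons_self ..)
        · rw [if_neg hsc]
          constructor
          · rintro (hm | ⟨hn, hm, hr⟩)
            · rcases List.mem_cons.1 hm with rfl | hm
              · exact absurd rfl hsc
              · exact Or.inl hm
            · exact Or.inr ⟨hn, List.mem_cons_of_mem _ hm, hr⟩
          · rintro (hm | ⟨hn, hm, hr⟩)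
            · exact Or.inl (List.mem_cons_of_mem _ hm)
            · rcases List.mem_cons.1 hm with rfl | hm
              · exact absurd rfl hsc
              · exact Or.inr ⟨hn, hm, hr⟩
    · have hstep : pvIns dth (dist, acc) c = (dist, acc) := by
        unfold pvIns; rw [if_neg h]
      rw [hstep]
      obtain ⟨ih1, ih2⟩ := ih dist acc
      have hreject : ∀ {P : Prop}, dist[c]? = none → (0 ≤ c.1 ∧ c.1 ≤ pvMAX) → P := by
        intro P hn hr
        exfalso
        apply h
        refine ⟨hr.1, hr.2, ?_⟩
        rw [Std.HashMap.contains_eq_isSome_getElem?, hn]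
        simp
      constructor
      · intro s v
        rw [ih1]
        constructor
        · rintro (hv | ⟨hn, hm, hr, rfl⟩)
          · exact Or.inl hv
          · exact Or.inr ⟨hn, List.mem_cons_of_mem _ hm, hr, rfl⟩
        · rintro (hv | ⟨hn, hm, hr, rfl⟩)
          · exact Or.inl hv
          · rcases List.mem_cons.1 hm with rfl | hm
            · exact hreject hn hr
            · exact Or.inr ⟨hn, hm, hr, rfl⟩
      · intro s
        rw [ih2]
        constructor
        · rintro (hm | ⟨hn, hm, hr⟩)
          · exact Or.inl hm
          · exact Or.inr ⟨hn, List.mem_cons_of_mem _ hm, hr⟩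
        · rintro (hm | ⟨hn, hm, hr⟩)
          · exact Or.inl hm
          · rcases List.mem_cons.1 hm with rfl | hm
            · exact hreject hn hr
            · exact Or.inr ⟨hn, hm, hr⟩

-- a level's fold of pvExpand = the fold of pvIns over the flattened candidate list
theorem pvExpand_foldl (dth : Int) (fr : List (Int × Int))
    (st : Std.HashMap (Int × Int) Int × List (Int × Int)) :
    fr.foldl (pvExpand dth) st =
      (fr.flatMap (fun pp => (pvMoves3 pp.1).map (fun n => (n, 1 - pp.2)))).foldl
        (pvIns dth) st := by
  induction fr generalizing st with
  | nil => rfl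
  | cons a fr ih => simp [List.flatMap_cons, List.foldl_append, pvExpand, ih]

-- candidate membership unfolded to neighbour membership
theorem mem_cand (fr : List (Int × Int)) (s : Int × Int) :
    (s ∈ fr.flatMap (fun pp => (pvMoves3 pp.1).map (fun n => (n, 1 - pp.2))) ∧
      0 ≤ s.1 ∧ s.1 ≤ pvMAX) ↔
    ∃ pp ∈ fr, s.1 ∈ pvNbrs pp.1 ∧ s.2 = 1 - pp.2 := by
  constructor
  · rintro ⟨hin, hr⟩
    obtain ⟨pp, hpp, hmem⟩ := List.mem_flatMap.1 hin
    obtain ⟨n, hn, heq⟩ := List.mem_map.1 hmem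
    cases heq
    refine ⟨pp, hpp, ?_, rfl⟩
    simp only [pvNbrs, List.mem_filter, List.mem_cons, List.not_mem_nil, or_false]
    have hn' : n = pp.1 - 1 ∨ n = pp.1 + 1 ∨ n = 2 * pp.1 := by
      simpa [pvMoves3] using hn
    exact ⟨by omega, decide_eq_true (by exact hr)⟩
  · rintro ⟨pp, hpp, hnb, hs2⟩
    simp only [pvNbrs, List.mem_filter, List.mem_cons, List.not_mem_nil, or_false] at hnb
    obtain ⟨hn, hr⟩ := hnb
    have hr' := of_decide_eq_true hr
    refine ⟨List.mem_flatMap.2 ⟨pp, hpp, List.mem_map.2 ⟨s.1, ?_, ?_⟩⟩, hr'⟩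
    · simp only [pvMoves3, List.mem_cons, List.not_mem_nil, or_false]
      omega
    · rw [← hs2]

-- parity flip under one step
theorem pvParFlip (j : Nat) : 1 - (j : Int) % 2 = ((j + 1 : Nat) : Int) % 2 := by
  push_cast; omega

-- completeness extension once the frontier is empty (no state first reached at level ℓ)
theorem pvComplete_of_closed (brown : Int) (dist : Std.HashMap (Int × Int) Int) (ℓ : Nat)
    (Ha : ∀ x b v, dist[(x, b)]? = some v →
      ∃ m : Nat, m ≤ ℓ ∧ v = (m : Int) ∧ b = (m : Int) % 2 ∧ x ∈ pvFront brown m)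
    (Hb : ∀ (m : Nat) (x : Int), m ≤ ℓ → x ∈ pvFront brown m →
      ∃ v : Int, dist[(x, (m : Int) % 2)]? = some v ∧ v ≤ (m : Int))
    (Hno : ∀ s : Int × Int, dist[s]? ≠ some (ℓ : Int)) :
    ∀ (m : Nat) (x : Int), x ∈ pvFront brown m →
      ∃ v : Int, dist[(x, (m : Int) % 2)]? = some v ∧ v ≤ (m : Int) := by
  intro m
  induction m using Nat.strong_induction_on with
  | _ m IH =>
    intro x hx
    by_cases hm : m ≤ ℓ
    · exact Hb m x hm hx
    · -- m > ℓ ≥ 0, so m = k + 1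
      obtain ⟨k, rfl⟩ : ∃ k, m = k + 1 := ⟨m - 1, by omega⟩
      obtain ⟨p, hp, hxp⟩ := List.mem_flatMap.1 hx
      obtain ⟨v, hv, hvle⟩ := IH k (by omega) p hp
      obtain ⟨j, hjℓ, rfl, hjpar, hpj⟩ := Ha _ _ _ hv
      have hjne : j ≠ ℓ := by
        intro h
        exact Hno _ (h ▸ hv)
      have hjlt : j + 1 ≤ ℓ := by omega
      have hxj1 : x ∈ pvFront brown (j + 1) :=
        List.mem_flatMap.2 ⟨p, hpj, hxp⟩
      obtain ⟨w, hw, hwle⟩ := Hb (j + 1) x hjlt hxj1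
      have hpar : ((j + 1 : Nat) : Int) % 2 = ((k + 1 : Nat) : Int) % 2 := by
        push_cast; push_cast at hjpar; omega
      refine ⟨w, by rw [← hpar]; exact hw, ?_⟩
      push_cast at hwle ⊢
      omega

-- main BFS lemma: soundness and completeness of the final distance map
theorem pvBFS_good (brown : Int) :
    ∀ (fuel : Nat) (dist : Std.HashMap (Int × Int) Int) (fr : List (Int × Int)) (ℓ : Nat)
      (Ha : ∀ x b v, dist[(x, b)]? = some v →
        ∃ m : Nat, m ≤ ℓ ∧ v = (m : Int) ∧ b = (m : Int) % 2 ∧ x ∈ pvFront brown m)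
      (Hb : ∀ (m : Nat) (x : Int), m ≤ ℓ → x ∈ pvFront brown m →
        ∃ v : Int, dist[(x, (m : Int) % 2)]? = some v ∧ v ≤ (m : Int))
      (Hc : ∀ s : Int × Int, s ∈ fr ↔ dist[s]? = some (ℓ : Int)),
      (∀ x b v, (pvBFS fuel dist fr (ℓ : Int))[(x, b)]? = some v →
        ∃ k : Nat, v = (k : Int) ∧ b = (k : Int) % 2 ∧ x ∈ pvFront brown k) ∧
      (∀ (m : Nat) (x : Int), m ≤ fuel + ℓ → x ∈ pvFront brown m →
        ∃ v : Int, (pvBFS fuel dist fr (ℓ : Int))[(x, (m : Int) % 2)]? = some v ∧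
          v ≤ (m : Int)) := by
  intro fuel
  induction fuel with
  | zero =>
    intro dist fr ℓ Ha Hb Hc
    refine ⟨fun x b v hv => ?_, fun m x hm hx => Hb m x (by omega) hx⟩
    obtain ⟨k, -, h1, h2, h3⟩ := Ha x b v hv
    exact ⟨k, h1, h2, h3⟩
  | succ fuel ih =>
    intro dist fr ℓ Ha Hb Hc
    by_cases hfr : fr = []
    · rw [show pvBFS (fuel + 1) dist fr (ℓ : Int) = dist from by rw [pvBFS, if_pos hfr]]
      have Hno : ∀ s : Int × Int, dist[s]? ≠ some (ℓ : Int) := by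
        intro s hs
        have := (Hc s).2 hs
        rw [hfr] at this
        simp at this
      refine ⟨fun x b v hv => ?_, fun m x hm hx =>
        pvComplete_of_closed brown dist ℓ Ha Hb Hno m x hx⟩
      obtain ⟨k, -, h1, h2, h3⟩ := Ha x b v hv
      exact ⟨k, h1, h2, h3⟩
    · rw [show pvBFS (fuel + 1) dist fr (ℓ : Int)
          = pvBFS fuel (fr.foldl (pvExpand (((ℓ + 1 : Nat) : Int))) (dist, [])).1
              (fr.foldl (pvExpand (((ℓ + 1 : Nat) : Int))) (dist, [])).2.reverse
              ((ℓ + 1 : Nat) : Int) from by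
        rw [pvBFS, if_neg hfr]
        norm_cast]
      set cand := fr.flatMap (fun pp => (pvMoves3 pp.1).map (fun n => (n, 1 - pp.2)))
        with hcand
      have hfold := pvExpand_foldl ((ℓ + 1 : Nat) : Int) fr (dist, [])
      rw [← hcand] at hfold
      obtain ⟨L1, L2⟩ := pvIns_foldl ((ℓ + 1 : Nat) : Int) cand dist []
      -- every frontier state is (p, ℓ % 2) for a p on the level-ℓ frontier
      have hfr_desc : ∀ pp ∈ fr, pp.2 = (ℓ : Int) % 2 ∧ pp.1 ∈ pvFront brown ℓ := by
        intro pp hpp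
        have hd := (Hc pp).1 hpp
        obtain ⟨m, hm, hmv, hb2, hf⟩ := Ha pp.1 pp.2 _ hd
        have hmℓ : m = ℓ := by exact_mod_cast hmv.symm
        subst hmℓ
        exact ⟨hb2, hf⟩
      have Ha' : ∀ x b v,
          (fr.foldl (pvExpand ((ℓ + 1 : Nat) : Int)) (dist, [])).1[(x, b)]? = some v →
          ∃ m : Nat, m ≤ ℓ + 1 ∧ v = (m : Int) ∧ b = (m : Int) % 2 ∧
            x ∈ pvFront brown m := by
        intro x b v hv
        rw [hfold] at hv
        rcases (L1 (x, b) v).1 hv with hv | ⟨-, hin, hr, rfl⟩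
        · obtain ⟨m, hm, h1, h2, h3⟩ := Ha x b v hv
          exact ⟨m, by omega, h1, h2, h3⟩
        · obtain ⟨pp, hpp, hnb, hs2⟩ := (mem_cand fr (x, b)).1 ⟨hin, hr⟩
          obtain ⟨hp2, hpf⟩ := hfr_desc pp hpp
          refine ⟨ℓ + 1, le_refl _, rfl, ?_, List.mem_flatMap.2 ⟨pp.1, hpf, hnb⟩⟩
          rw [show ((x, b) : Int × Int).2 = b from rfl] at hs2
          rw [hs2, hp2]
          exact pvParFlip ℓ
      have Hb' : ∀ (m : Nat) (x : Int), m ≤ ℓ + 1 → x ∈ pvFront brown m →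
          ∃ v : Int,
            (fr.foldl (pvExpand ((ℓ + 1 : Nat) : Int)) (dist, [])).1[(x, (m : Int) % 2)]?
              = some v ∧ v ≤ (m : Int) := by
        intro m x hm hx
        by_cases hmℓ : m ≤ ℓ
        · obtain ⟨v, hv, hvle⟩ := Hb m x hmℓ hx
          exact ⟨v, by rw [hfold]; exact (L1 _ v).2 (Or.inl hv), hvle⟩
        · have hm1 : m = ℓ + 1 := by omega
          subst hm1
          obtain ⟨p, hp, hxp⟩ := List.mem_flatMap.1 hx
          obtain ⟨v, hv, hvle⟩ := Hb ℓ p (le_refl _) hp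
          obtain ⟨j, hjℓ, rfl, hjpar, hpj⟩ := Ha p _ _ hv
          by_cases hcont : dist[(x, ((ℓ + 1 : Nat) : Int) % 2)]? = none
          · by_cases hjeq : j = ℓ
            · subst hjeq
              have hppfr : ((p, (j : Int) % 2) : Int × Int) ∈ fr := (Hc _).2 hv
              have hin := (mem_cand fr (x, ((j + 1 : Nat) : Int) % 2)).2
                ⟨(p, (j : Int) % 2), hppfr, hxp, (pvParFlip j).symm⟩
              refine ⟨((j + 1 : Nat) : Int), ?_, le_refl _⟩
              rw [hfold]
              exact (L1 _ _).2 (Or.inr ⟨hcont, hin.1, hin.2, rfl⟩)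
            · have hxj : x ∈ pvFront brown (j + 1) := List.mem_flatMap.2 ⟨p, hpj, hxp⟩
              obtain ⟨w, hw, hwle⟩ := Hb (j + 1) x (by omega) hxj
              have hpareq : ((j + 1 : Nat) : Int) % 2 = ((ℓ + 1 : Nat) : Int) % 2 := by
                push_cast; push_cast at hjpar; omega
              rw [hpareq, hcont] at hw
              cases hw
          · rcases ho : dist[(x, ((ℓ + 1 : Nat) : Int) % 2)]? with _ | v0
            · exact absurd ho hcont
            obtain ⟨k, hkℓ, rfl, -, -⟩ := Ha x _ _ ho
            refine ⟨(k : Int), ?_, by push_cast; omega⟩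
            rw [hfold]
            exact (L1 _ _).2 (Or.inl ho)
      have Hc' : ∀ s : Int × Int,
          s ∈ (fr.foldl (pvExpand ((ℓ + 1 : Nat) : Int)) (dist, [])).2.reverse ↔
          (fr.foldl (pvExpand ((ℓ + 1 : Nat) : Int)) (dist, [])).1[s]?
            = some ((ℓ + 1 : Nat) : Int) := by
        intro s
        rw [List.mem_reverse, hfold, L2 s, L1 s _]
        constructor
        · rintro (hm | ⟨hn, hin, hr⟩)
          · exact absurd hm (List.not_mem_nil)
          · exact Or.inr ⟨hn, hin, hr, rfl⟩
        · rintro (hv | ⟨hn, hin, hr, -⟩)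
          · obtain ⟨k, hkℓ, hkv, -, -⟩ := Ha s.1 s.2 _ hv
            exfalso
            have : (ℓ + 1 : Nat) = k := by exact_mod_cast hkv
            omega
          · exact Or.inr ⟨hn, hin, hr⟩
      obtain ⟨R1, R2⟩ := ih _ _ (ℓ + 1) Ha' Hb' Hc'
      exact ⟨R1, fun m x hm hx => R2 m x (by omega) hx⟩

-- ---------- scan bridge ----------

theorem pvScan_check (brown : Int) (hb : 0 ≤ brown ∧ brown ≤ pvMAX)
    (dist : Std.HashMap (Int × Int) Int)
    (G1 : ∀ x b v, dist[(x, b)]? = some v →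
      ∃ k : Nat, v = (k : Int) ∧ b = (k : Int) % 2 ∧ x ∈ pvFront brown k)
    (G2 : ∀ (m : Nat) (x : Int), m ≤ 400000 → x ∈ pvFront brown m →
      ∃ v : Int, dist[(x, (m : Int) % 2)]? = some v ∧ v ≤ (m : Int))
    (m : Nat) (hm : m ≤ 400000) (x : Int) :
    (x ∈ pvFront brown m) ↔
      (match dist[(x, (m : Int) % 2)]? with
        | some v => decide (v ≤ (m : Int))
        | none => false) = true := by
  constructor
  · intro hx
    obtain ⟨v, hv, hvle⟩ := G2 m x hm hx
    rw [hv]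
    simpa using hvle
  · intro h
    rcases hd : dist[(x, (m : Int) % 2)]? with _ | v
    · rw [hd] at h; simp at h
    · rw [hd] at h
      simp only [decide_eq_true_eq] at h
      obtain ⟨k, rfl, hpar, hxk⟩ := G1 x _ _ hd
      have hkm : k ≤ m := by exact_mod_cast h
      have : k % 2 = m % 2 := by push_cast at hpar; omega
      exact pvFront_mono brown hb k m hkm this x hxk

theorem pvRunF_eq_pvScan (brown : Int) (hb : 0 ≤ brown ∧ brown ≤ pvMAX)
    (dist : Std.HashMap (Int × Int) Int)
    (G1 : ∀ x b v, dist[(x, b)]? = some v →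
      ∃ k : Nat, v = (k : Int) ∧ b = (k : Int) % 2 ∧ x ∈ pvFront brown k)
    (G2 : ∀ (m : Nat) (x : Int), m ≤ 400000 → x ∈ pvFront brown m →
      ∃ v : Int, dist[(x, (m : Int) % 2)]? = some v ∧ v ≤ (m : Int)) :
    ∀ (fuel : Nat) (c : Int) (k : Nat), k + fuel ≤ 400000 →
      pvRunF fuel c (k : Int) (pvFront brown k) = pvScan fuel c (k : Int) dist := by
  intro fuel
  induction fuel with
  | zero => intro c k hk; rfl
  | succ fuel ih =>
    intro c k hk
    simp only [pvRunF, pvScan]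
    by_cases h1 : c ≤ pvMAX
    · simp only [if_pos h1]
      by_cases h2 : c + (k : Int) > pvMAX
      · simp [h2]
      · simp only [if_neg h2]
        have hmod : PySem.Int.mod (k : Int) 2 = (k : Int) % 2 :=
          PySem.Int.mod_eq_emod_of_pos (by omega)
        have hguard := pvScan_check brown hb dist G1 G2 k (by omega) (c + (k : Int))
        rw [hmod]
        by_cases h3 : (c + (k : Int)) ∈ pvFront brown k
        · rw [if_pos h3, if_pos (hguard.1 h3)]
        · rw [if_neg h3, if_neg (fun h => h3 (hguard.2 h))]
          have : (k : Int) + 1 = ((k + 1 : Nat) : Int) := by push_cast; ring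
          rw [this]
          exact ih (c + (k : Int)) (k + 1) (by omega)
    · simp [h1]

-- ===== VERDICT (by name: the statement is the Claim_ definition above) =====
theorem solution_spec : Claim_equal_solution := by
  intro cony brown _ hpre
  show solution cony brown = solution_alt cony brown
  have hb : 0 ≤ brown ∧ brown ≤ pvMAX := by
    rw [pvMAX_eq]; exact ⟨hpre.2.2.1, hpre.2.2.2⟩
  unfold solution solution_alt
  have hA : pvRunA 2000 cony 0
      ((∅ : Std.HashMap Int (List Int)).insert brown
        (PySem.Set.add ((∅ : Std.HashMap Int (List Int)).getD brown []) 0))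
      [(brown, 0)] = pvRunF 2000 cony 0 [brown] := by
    apply pvRunA_eq_pvRunF 2000 0 cony _ _ [brown] rfl
    · intro x
      by_cases h : x = brown
      · subst h
        simp [Std.HashMap.getD_insert, PySem.Set.add, PySem.Set.contains]
      · have hbx : ¬ brown = x := fun hh => h hh.symm
        simp [Std.HashMap.getD_insert, hbx]
        exact h
    · intro x s hs
      by_cases h : x = brown
      · subst h
        simp [Std.HashMap.getD_insert, PySem.Set.add, PySem.Set.contains] at hs
        omega
      · have hbx : ¬ brown = x := fun hh => h hh.symm
        simp [Std.HashMap.getD_insert, hbx] at hs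
  rw [hA]
  have hzero : ((0 : Nat) : Int) % 2 = 0 := by decide
  have Ha0 : ∀ x b v,
      ((∅ : Std.HashMap (Int × Int) Int).insert (brown, 0) 0)[(x, b)]? = some v →
      ∃ m : Nat, m ≤ 0 ∧ v = (m : Int) ∧ b = (m : Int) % 2 ∧ x ∈ pvFront brown m := by
    intro x b v hv
    rw [Std.HashMap.getElem?_insert] at hv
    by_cases h : ((brown, (0 : Int)) : Int × Int) = (x, b)
    · obtain ⟨h1, h2⟩ := Prod.mk.injEq .. ▸ h
      have : ((brown, (0 : Int)) == ((x, b) : Int × Int)) = true := beq_iff_eq.2 h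
      rw [this, if_pos rfl] at hv
      refine ⟨0, le_refl _, by exact_mod_cast (Option.some.inj hv).symm, ?_, ?_⟩
      · rw [hzero]; exact h2.symm
      · rw [← h1]; exact List.mem_singleton.2 rfl
    · have : ((brown, (0 : Int)) == ((x, b) : Int × Int)) = false := beq_eq_false_iff_ne.2 h
      rw [this] at hv
      simp at hv
  have Hb0 : ∀ (m : Nat) (x : Int), m ≤ 0 → x ∈ pvFront brown m →
      ∃ v : Int,
        ((∅ : Std.HashMap (Int × Int) Int).insert (brown, 0) 0)[(x, (m : Int) % 2)]?
          = some v ∧ v ≤ (m : Int) := by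
    intro m x hm hx
    obtain rfl : m = 0 := by omega
    obtain rfl : x = brown := by simpa [pvFront] using hx
    refine ⟨0, ?_, by simp⟩
    rw [hzero, Std.HashMap.getElem?_insert]
    simp
  have Hc0 : ∀ s : Int × Int, s ∈ ([((brown, 0) : Int × Int)]) ↔
      ((∅ : Std.HashMap (Int × Int) Int).insert (brown, 0) 0)[s]? = some ((0 : Nat) : Int) := by
    intro s
    rw [Std.HashMap.getElem?_insert]
    constructor
    · intro hs
      obtain rfl := List.mem_singleton.1 hs
      simp
    · intro hs
      by_cases h : ((brown, (0 : Int)) : Int × Int) = s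
      · exact h ▸ List.mem_singleton.2 rfl
      · have : ((brown, (0 : Int)) == s) = false := beq_eq_false_iff_ne.2 h
        rw [this] at hs
        simp at hs
  obtain ⟨G1, G2⟩ := pvBFS_good brown 400010 _ [(brown, 0)] 0 Ha0 Hb0 Hc0
  exact pvRunF_eq_pvScan brown hb _ G1
    (fun m x hm hx => G2 m x (by omega) hx) 2000 cony 0 (by omega)
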